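-- pv_equiv track=rewrite | github.com/jsh/lifts | src/lifts/lifts.py | decompose_into_lifts
-- ===== SOURCE A (Python) =====
-- def decompose_into_lifts(seq: list[int]) -> list[list[int]]:
--     """
--     Decompose a sequence into its component lifts.
--
--     A lift is a sequence of numbers such that the first number is the smallest.
--     The output is a list of such lifts.
--
--     Args:
--         seq (list[int]): The sequence to decompose into lifts
--
--     Returns:
--         list[list[int]]: A list of lifts
--     """
--     if not seq:
--         return []
--
--     lifts = []
--     current_lift = [seq[0]]
--     current_lift_min = current_lift[0]
--
--     for i in range(1, len(seq)):
--         next = seq[i]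
--         if next > current_lift_min:
--             current_lift.append(next)
--             current_lift_min = min(current_lift_min, next)
--         else:
--             lifts.append(current_lift)
--             current_lift = [seq[i]]
--             current_lift_min = next
--
--     lifts.append(current_lift)
--     return lifts
-- ===== SOURCE B (Python) =====
-- def decompose_into_lifts(seq: list[int]) -> list[list[int]]:
--     """Three staged passes instead of an accumulate-and-flush loop: compute the
--     running prefix minima, mark lift starts (an element starts a lift exactly
--     when it is a non-strict left-to-right minimum), then group by the marks."""
--     # stage 1: running minima of the prefixes of seq
--     mins = []
--     for x in seq:
--         mins.append(x if not mins or x < mins[-1] else mins[-1])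
--     # stage 2: seq[i] starts a lift iff i == 0 or seq[i] <= min(seq[:i])
--     starts = [True] + [x <= m for x, m in zip(seq[1:], mins)]
--     # stage 3: open a new group at each marked element, else extend the last group
--     res = []
--     for x, s in zip(seq, starts):
--         if s:
--             res.append([x])
--         else:
--             res[-1].append(x)
--     return res
-- ===== Notes on version B (the rewrite author's own statement) =====
-- stated objective: alternative
-- what changed: B replaces A's single accumulate-and-flush loop (current lift grown element by element with a tracked minimum) by three staged passes: compute the running prefix minima, mark lift starts as exactly the non-strict left-to-right minima of the sequence, then group the elements by those marks.
import Mathlib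
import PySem

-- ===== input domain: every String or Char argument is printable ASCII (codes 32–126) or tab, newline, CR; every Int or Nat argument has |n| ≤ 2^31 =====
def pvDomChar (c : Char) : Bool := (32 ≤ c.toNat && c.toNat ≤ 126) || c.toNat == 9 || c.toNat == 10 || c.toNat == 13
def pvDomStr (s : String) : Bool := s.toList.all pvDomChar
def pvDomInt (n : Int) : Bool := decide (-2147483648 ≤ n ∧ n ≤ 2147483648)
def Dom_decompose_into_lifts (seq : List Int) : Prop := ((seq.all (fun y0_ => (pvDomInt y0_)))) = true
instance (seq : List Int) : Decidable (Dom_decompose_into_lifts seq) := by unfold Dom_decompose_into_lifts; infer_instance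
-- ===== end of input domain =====

-- B replaces A's accumulate-and-flush loop by three staged passes: running prefix
-- minima, start marks (non-strict left-to-right minima), then grouping by the marks.

-- ===== PORT A =====
-- the body of A's for-loop on the fetched element next = seq[i]
def aStep (st : List (List Int) × List Int × Int) (next : Int) :
    List (List Int) × List Int × Int :=
  if next > st.2.2 then (st.1, st.2.1 ++ [next], min st.2.2 next)
  else (st.1 ++ [st.2.1], [next], next)

def decompose_into_lifts (seq : List Int) : List (List Int) :=
  match seq with
  | [] => []
  | _ :: _ =>
    let x0 := PySem.List.pyGetD seq 0 0
    let st := (PySem.List.pyRange 1 (seq.length : Int) 1).foldl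
      (fun st i => aStep st (PySem.List.pyGetD seq i 0)) ([], [x0], x0)
    st.1 ++ [st.2.1]

-- ===== PORT B =====
-- stage-1 loop body: mins.append(x if not mins or x < mins[-1] else mins[-1])
def bMinStep (mins : List Int) (x : Int) : List Int :=
  mins ++ [if mins = [] then x else if x < mins.getLastD 0 then x else mins.getLastD 0]

-- stage-3 loop body: res.append([x]) or res[-1].append(x)
-- (res[-1] is ported with getLastD; the False mark is never the first, so res ≠ [] there)
def bGrpStep (res : List (List Int)) (p : Int × Bool) : List (List Int) :=
  if p.2 then res ++ [[p.1]]
  else res.dropLast ++ [res.getLastD [] ++ [p.1]]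

def decompose_into_lifts_alt (seq : List Int) : List (List Int) :=
  let mins := seq.foldl bMinStep []
  let starts := true :: ((PySem.List.slice seq (some 1) none).zip mins).map
    (fun p => decide (p.1 ≤ p.2))
  (seq.zip starts).foldl bGrpStep []

-- ===== PRECONDITION & SPEC =====
def Spec_decompose_into_lifts (seq : List Int) (out : List (List Int)) : Prop := out = decompose_into_lifts_alt seq
instance (seq : List Int) (out : List (List Int)) : Decidable (Spec_decompose_into_lifts seq out) := by unfold Spec_decompose_into_lifts; infer_instance

-- ===== CLAIM (what is proved, stated in full; the proofs are below) =====
def Claim_equal_decompose_into_lifts : Prop := ∀ (seq : List Int), Dom_decompose_into_lifts seq → Spec_decompose_into_lifts seq (decompose_into_lifts seq)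

-- ===== LEMMAS AND PROOFS =====

-- common reference recursion: cur is the open lift, m its first element
def refLifts (cur : List Int) (m : Int) : List Int → List (List Int)
  | [] => [cur]
  | x :: xs => if x ≤ m then cur :: refLifts [x] x xs else refLifts (cur ++ [x]) m xs

-- recursive forms of B's stage-1 minima and stage-2 marks
def minsF (m : Int) : List Int → List Int
  | [] => []
  | x :: xs => (if x < m then x else m) :: minsF (if x < m then x else m) xs

def flagsF (m : Int) : List Int → List Bool
  | [] => []
  | x :: xs => decide (x ≤ m) :: flagsF (if x < m then x else m) xs

-- A's loop equals refLifts
theorem aFold_eq (xs : List Int) : ∀ (lifts : List (List Int)) (cur : List Int) (m : Int),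
    (xs.foldl aStep (lifts, cur, m)).1 ++ [(xs.foldl aStep (lifts, cur, m)).2.1]
      = lifts ++ refLifts cur m xs := by
  induction xs with
  | nil => intro lifts cur m; simp [refLifts]
  | cons x xs ih =>
    intro lifts cur m
    by_cases h : x > m
    · have hmin : min m x = m := min_eq_left (le_of_lt h)
      simp only [List.foldl_cons, aStep, if_pos h, hmin, refLifts, if_neg (not_le.mpr h)]
      exact ih lifts (cur ++ [x]) m
    · simp only [List.foldl_cons, aStep, if_neg h, refLifts, if_pos (not_lt.mp h)]
      rw [ih (lifts ++ [cur]) [x] x, List.append_assoc]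
      rfl

-- B's stage-1 loop builds acc ++ minsF m xs
theorem bMins_eq (xs : List Int) : ∀ (acc : List Int) (m : Int), acc ≠ [] →
    acc.getLastD 0 = m → xs.foldl bMinStep acc = acc ++ minsF m xs := by
  induction xs with
  | nil => intro acc m _ _; simp [minsF]
  | cons x xs ih =>
    intro acc m hne hlast
    have hstep : bMinStep acc x = acc ++ [if x < m then x else m] := by
      simp only [bMinStep, if_neg hne, hlast]
    rw [List.foldl_cons, hstep,
      ih (acc ++ [if x < m then x else m]) (if x < m then x else m) (by simp)
        (by simp)]
    simp [minsF]

-- B's stage-2 marks equal flagsF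
theorem bFlags_eq (tl : List Int) : ∀ (m : Int),
    (tl.zip (m :: minsF m tl)).map (fun p => decide (p.1 ≤ p.2)) = flagsF m tl := by
  induction tl with
  | nil => intro m; simp [flagsF]
  | cons x xs ih =>
    intro m
    simp only [minsF, List.zip_cons_cons, List.map_cons, flagsF]
    rw [ih (if x < m then x else m)]

-- B's stage-3 loop equals refLifts
theorem bGrp_eq (tl : List Int) : ∀ (m : Int) (cur : List Int) (res : List (List Int)),
    (tl.zip (flagsF m tl)).foldl bGrpStep (res ++ [cur]) = res ++ refLifts cur m tl := by
  induction tl with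
  | nil => intro m cur res; simp [refLifts]
  | cons x xs ih =>
    intro m cur res
    simp only [flagsF, List.zip_cons_cons, List.foldl_cons]
    by_cases h : x ≤ m
    · have hm : (if x < m then x else m) = x := by omega
      have hstep : bGrpStep (res ++ [cur]) (x, decide (x ≤ m)) = (res ++ [cur]) ++ [[x]] := by
        simp [bGrpStep, h]
      rw [hstep, hm, ih x [x] (res ++ [cur]), List.append_assoc]
      simp [refLifts, if_pos h]
    · have hm : (if x < m then x else m) = m := by omega
      have hstep : bGrpStep (res ++ [cur]) (x, decide (x ≤ m)) = res ++ [cur ++ [x]] := by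
        simp [bGrpStep, h]
      rw [hstep, hm, ih m (cur ++ [x]) res]
      simp [refLifts, if_neg h]

-- ===== VERDICT (by name: the statement is the Claim_ definition above) =====
theorem decompose_into_lifts_spec : Claim_equal_decompose_into_lifts := by
  intro seq _
  unfold Spec_decompose_into_lifts
  match seq with
  | [] => decide
  | h :: tl =>
    have h0 : PySem.List.pyGetD (h :: tl) (0 : Int) 0 = h := by
      rw [show ((0 : Int)) = ((0 : Nat) : Int) by norm_num, PySem.List.pyGetD_natCast]; simp
    -- A side
    have hA : decompose_into_lifts (h :: tl) = refLifts [h] h tl := by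
      simp only [decompose_into_lifts, h0]
      rw [PySem.List.foldl_pyRange_pyGetD' (h :: tl) 0 aStep ([], [h], h) (by norm_num)]
      exact aFold_eq tl [] [h] h
    -- B side
    have hmins : (h :: tl).foldl bMinStep [] = h :: minsF h tl := by
      rw [List.foldl_cons, show bMinStep [] h = [h] by simp [bMinStep],
        bMins_eq tl [h] h (by simp) (by simp)]
      rfl
    have hB : decompose_into_lifts_alt (h :: tl) = refLifts [h] h tl := by
      simp only [decompose_into_lifts_alt, hmins, PySem.List.slice_from_one, List.tail_cons,
        bFlags_eq tl h, List.zip_cons_cons, List.foldl_cons]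
      rw [show bGrpStep [] (h, true) = [] ++ [[h]] by simp [bGrpStep],
        bGrp_eq tl h [h] []]
      rfl
    rw [hA, hB]
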